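-- pv_equiv track=rewrite | github.com/OrestisDev/Logistic-Regression-Spam-Filter | logistictraining.py | merge_letter_sequences
-- ===== SOURCE A (Python) =====
-- def merge_letter_sequences(tokens):
--     merged = []
--     buffer = []
--     for t in tokens:
--         if len(t) == 1 and t.isalpha():
--             buffer.append(t)
--         else:
--             if len(buffer) > 1:
--                 merged.append("".join(buffer))
--             elif buffer:
--                 merged.extend(buffer)
--             buffer = []
--             merged.append(t)
--     if len(buffer) > 1:
--         merged.append("".join(buffer))
--     else:
--         merged.extend(buffer)
--     return merged
-- ===== SOURCE B (Python) =====
-- def merge_letter_sequences(tokens):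
--     def is_letter(t):
--         return len(t) == 1 and t.isalpha()
--     out = []
--     i = 0
--     n = len(tokens)
--     while i < n:
--         t = tokens[i]
--         if is_letter(t):
--             run = [t]
--             i += 1
--             while i < n and is_letter(tokens[i]):
--                 run.append(tokens[i])
--                 i += 1
--             out.append("".join(run) if len(run) > 1 else t)
--         else:
--             out.append(t)
--             i += 1
--     return out
-- ===== Notes on version B (the rewrite author's own statement) =====
-- stated objective: alternative
-- what changed: B replaces A's buffer-and-flush accumulator with a run-splitting scan: it detects each maximal run of single-letter tokens up front (groupby-style) and emits the joined run (or the lone letter / non-matching token) directly, so there is no buffer state and no duplicated flush-at-end tail.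
import Mathlib
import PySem

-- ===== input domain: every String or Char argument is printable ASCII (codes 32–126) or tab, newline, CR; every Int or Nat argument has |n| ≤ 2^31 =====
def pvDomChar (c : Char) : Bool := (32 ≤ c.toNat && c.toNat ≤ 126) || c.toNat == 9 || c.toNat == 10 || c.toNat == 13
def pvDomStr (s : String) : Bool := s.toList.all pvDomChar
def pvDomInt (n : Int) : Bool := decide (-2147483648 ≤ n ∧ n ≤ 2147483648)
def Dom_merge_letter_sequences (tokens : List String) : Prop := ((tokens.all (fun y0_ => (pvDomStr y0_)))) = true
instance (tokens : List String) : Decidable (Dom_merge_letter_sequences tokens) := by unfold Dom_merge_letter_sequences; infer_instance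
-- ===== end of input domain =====

-- B merges maximal runs of single-letter tokens by scanning each run up front (groupby-style)
-- instead of A's buffer-and-flush accumulator; same cost, no buffer state or duplicated end flush.

-- ===== PORT A =====
-- the test `len(t) == 1 and t.isalpha()` (shared by both sides)
def pvIsLetter (t : String) : Bool := PySem.Str.len t == 1 && PySem.Str.strIsalpha t

-- A's flush of the buffer: `if len(buffer) > 1: merged.append("".join(buffer)) else: merged.extend(buffer)`
def pvFlush (merged buffer : List String) : List String :=
  if buffer.length > 1 then merged ++ [PySem.Str.join "" buffer] else merged ++ buffer

-- A's for-loop over tokens carrying the state (merged, buffer), then the final flush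
def mlsA (merged buffer : List String) : List String → List String
  | [] => pvFlush merged buffer
  | t :: ts =>
    if pvIsLetter t then mlsA merged (buffer ++ [t]) ts
    else mlsA (pvFlush merged buffer ++ [t]) [] ts

def merge_letter_sequences (tokens : List String) : List String :=
  mlsA [] [] tokens

-- ===== PORT B =====
-- B's outer while-loop: take the maximal leading run of single-letter tokens, emit it joined
-- (or the lone letter), otherwise emit the token; recurse on the remainder.
def merge_letter_sequences_alt (tokens : List String) : List String :=
  match tokens with
  | [] => []
  | t :: rest =>
    if pvIsLetter t then
      let run := List.takeWhile pvIsLetter (t :: rest)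
      (if run.length > 1 then PySem.Str.join "" run else t)
        :: merge_letter_sequences_alt (List.dropWhile pvIsLetter rest)
    else t :: merge_letter_sequences_alt rest
termination_by tokens.length
decreasing_by
  · simpa using Nat.lt_succ_of_le (List.length_dropWhile_le _ _)
  · simp

-- ===== PRECONDITION & SPEC =====
def Spec_merge_letter_sequences (tokens : List String) (out : List String) : Prop := out = merge_letter_sequences_alt tokens
instance (tokens : List String) (out : List String) : Decidable (Spec_merge_letter_sequences tokens out) := by unfold Spec_merge_letter_sequences; infer_instance

-- ===== CLAIM (what is proved, stated in full; the proofs are below) =====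
def Claim_equal_merge_letter_sequences : Prop := ∀ (tokens : List String), Dom_merge_letter_sequences tokens → Spec_merge_letter_sequences tokens (merge_letter_sequences tokens)

-- ===== LEMMAS AND PROOFS =====

-- A's `merged` accumulator is only ever appended to: it factors out of the loop.
theorem mlsA_shift (ts : List String) : ∀ (m b : List String),
    mlsA m b ts = m ++ mlsA [] b ts := by
  induction ts with
  | nil => intro m b; simp only [mlsA, pvFlush]; split <;> simp
  | cons t ts ih =>
    intro m b
    simp only [mlsA]
    split
    · rw [ih m, ih []]
    · rw [ih (pvFlush m b ++ [t]), ih (pvFlush [] b ++ [t])]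
      simp only [pvFlush]; split <;> simp

-- letters already consumed into the buffer behave as if they were still ahead in the input
theorem mlsA_buffer : ∀ (c b ts : List String), (∀ x ∈ c, pvIsLetter x = true) →
    mlsA [] (b ++ c) ts = mlsA [] b (c ++ ts) := by
  intro c
  induction c with
  | nil => intro b ts _; simp
  | cons y c ih =>
    intro b ts h
    have hy : pvIsLetter y = true := h y (by simp)
    have hstep : mlsA [] b (y :: (c ++ ts)) = mlsA [] (b ++ [y]) (c ++ ts) := by
      simp [mlsA, hy]
    calc mlsA [] (b ++ y :: c) ts = mlsA [] ((b ++ [y]) ++ c) ts := by simp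
      _ = mlsA [] (b ++ [y]) (c ++ ts) := ih (b ++ [y]) ts (fun x hx => h x (by simp [hx]))
      _ = mlsA [] b (y :: c ++ ts) := by rw [← hstep]; simp

theorem dropWhile_head_false (p : String → Bool) : ∀ (l : List String) (u : String)
    (us : List String), l.dropWhile p = u :: us → p u = false := by
  intro l
  induction l with
  | nil => intro u us h; simp [List.dropWhile] at h
  | cons x l ih =>
    intro u us h
    by_cases hx : p x = true
    · rw [List.dropWhile_cons_of_pos hx] at h; exact ih u us h
    · rw [List.dropWhile_cons_of_neg hx] at h
      cases h; simpa using hx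

theorem mlsA_eq_alt_len : ∀ (n : Nat) (ts : List String), ts.length ≤ n →
    mlsA [] [] ts = merge_letter_sequences_alt ts := by
  intro n
  induction n with
  | zero =>
    intro ts h
    have : ts = [] := List.eq_nil_of_length_eq_zero (Nat.le_zero.mp h)
    subst this; simp [mlsA, pvFlush, merge_letter_sequences_alt]
  | succ n ih =>
    intro ts h
    match ts with
    | [] => simp [mlsA, pvFlush, merge_letter_sequences_alt]
    | t :: ts =>
      by_cases ht : pvIsLetter t = true
      · have hsplit : t :: ts = (t :: ts).takeWhile pvIsLetter ++ ts.dropWhile pvIsLetter := by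
          conv_lhs => rw [← List.takeWhile_append_dropWhile (p := pvIsLetter) (l := t :: ts)]
          simp [ht]
        have hrun : ∀ x ∈ (t :: ts).takeWhile pvIsLetter, pvIsLetter x = true :=
          fun x hx => List.mem_takeWhile_imp hx
        have hbuf := mlsA_buffer ((t :: ts).takeWhile pvIsLetter) [] (ts.dropWhile pvIsLetter) hrun
        conv_lhs => rw [hsplit]
        rw [← hbuf]
        simp only [List.nil_append]
        have hruncons : (t :: ts).takeWhile pvIsLetter = t :: ts.takeWhile pvIsLetter := by
          simp [ht]
        unfold merge_letter_sequences_alt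
        simp only [ht, if_pos]
        match hd : ts.dropWhile pvIsLetter with
        | [] =>
          -- input ends inside the run: A's final flush equals B's single emitted element
          rw [hruncons]
          match htw : ts.takeWhile pvIsLetter with
          | [] => simp [mlsA, pvFlush, merge_letter_sequences_alt]
          | u :: us => simp [mlsA, pvFlush, merge_letter_sequences_alt]
        | u :: us =>
          have hu : pvIsLetter u = false := dropWhile_head_false pvIsLetter ts u us hd
          have hlen : us.length ≤ n := by
            have h2 : (ts.dropWhile pvIsLetter).length ≤ ts.length :=
              List.length_dropWhile_le _ _
            rw [hd] at h2
            simp at h2 h ⊢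
            omega
          match htw : ts.takeWhile pvIsLetter with
          | [] =>
            simp only [hruncons, htw, mlsA, hu, Bool.false_eq_true, if_false, pvFlush]
            rw [mlsA_shift, ih us hlen]
            simp [merge_letter_sequences_alt, htw, hu]
          | v :: vs =>
            simp only [hruncons, htw, mlsA, hu, Bool.false_eq_true, if_false, pvFlush]
            rw [mlsA_shift, ih us hlen]
            simp [merge_letter_sequences_alt, htw, hu]
      · have hlen : ts.length ≤ n := by simpa using h
        unfold merge_letter_sequences_alt
        simp only [mlsA, ht, Bool.false_eq_true, if_false, pvFlush]
        rw [mlsA_shift, ih ts hlen]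
        simp

theorem mlsA_eq_alt (ts : List String) : mlsA [] [] ts = merge_letter_sequences_alt ts :=
  mlsA_eq_alt_len ts.length ts (Nat.le_refl _)

-- ===== VERDICT (by name: the statement is the Claim_ definition above) =====
theorem merge_letter_sequences_spec : Claim_equal_merge_letter_sequences := by
  intro tokens _
  unfold Spec_merge_letter_sequences merge_letter_sequences
  exact mlsA_eq_alt tokens
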